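-- pv_equiv track=rewrite | github.com/fakey5669/Coding-Test-Study | 프로그래머스/0/120843. 공 던지기/공 던지기.py | solution
-- ===== SOURCE A (Python) =====
-- def solution(numbers, k):
--     answer = 0
--     i = 0
--
--     for _ in range(k):
--         answer=numbers[i]
--         i+=2
--         if i>len(numbers)-1:
--             i-=len(numbers)
--     return answer
-- ===== SOURCE B (Python) =====
-- def solution(numbers, k):
--     # Closed form: after t throws the ball is at index 2*(t-1) mod n,
--     # so the k-th throw reads that element directly (O(1) instead of O(k)).
--     if k <= 0:
--         return 0
--     return numbers[(2 * (k - 1)) % len(numbers)]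
-- ===== Notes on version B (the rewrite author's own statement) =====
-- stated objective: faster
-- what changed: Replaces the O(k) simulation loop (index +2 with wraparound each throw) by the closed-form modular index numbers[(2*(k-1)) % len(numbers)].
import Mathlib
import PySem

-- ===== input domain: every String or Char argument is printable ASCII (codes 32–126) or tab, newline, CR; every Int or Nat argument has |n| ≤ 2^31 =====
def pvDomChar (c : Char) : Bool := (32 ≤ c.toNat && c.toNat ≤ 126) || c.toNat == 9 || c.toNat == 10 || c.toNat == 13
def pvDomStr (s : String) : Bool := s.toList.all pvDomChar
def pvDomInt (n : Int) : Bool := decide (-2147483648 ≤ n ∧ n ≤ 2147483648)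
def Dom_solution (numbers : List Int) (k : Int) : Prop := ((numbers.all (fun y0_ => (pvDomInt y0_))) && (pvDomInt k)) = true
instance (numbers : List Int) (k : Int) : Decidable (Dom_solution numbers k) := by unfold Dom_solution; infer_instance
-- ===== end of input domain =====

-- B replaces A's O(k) throw-by-throw simulation with the closed-form modular index
-- numbers[(2*(k-1)) % len(numbers)] (objective: faster, asymptotically).


-- ===== PORT A =====
-- the for-loop over range(k) with state (answer, i); none = IndexError at numbers[i]
def solAuxA (numbers : List Int) : Nat → Int → Int → Option Int
  | 0, a, _ => some a
  | n + 1, _, i =>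
    match PySem.List.pyGet? numbers i with
    | none => none
    | some v =>
      let i2 := i + 2
      let i3 := if i2 > (numbers.length : Int) - 1 then i2 - (numbers.length : Int) else i2
      solAuxA numbers n v i3

def solution (numbers : List Int) (k : Int) : Int :=
  (solAuxA numbers k.toNat 0 0).getD 0

-- ===== PORT B =====
def solution_alt (numbers : List Int) (k : Int) : Int :=
  if k ≤ 0 then 0
  else (PySem.List.pyGet? numbers (PySem.Int.mod (2 * (k - 1)) (numbers.length : Int))).getD 0

-- ===== PRECONDITION & SPEC =====
-- Pre_ excludes exactly the inputs where A raises IndexError: an empty list with k ≥ 1,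
-- and a one-element list with k ≥ 2 (the wraparound leaves i = 1, out of range).
def Pre_solution (numbers : List Int) (k : Int) : Prop :=
  k ≤ 0 ∨ 2 ≤ numbers.length ∨ (numbers.length = 1 ∧ k = 1)
instance (numbers : List Int) (k : Int) : Decidable (Pre_solution numbers k) := by
  unfold Pre_solution; infer_instance
def pvWitness_solution : List Int × Int := ([3, 7, 9, 2], 5)

def Spec_solution (numbers : List Int) (k : Int) (out : Int) : Prop := out = solution_alt numbers k
instance (numbers : List Int) (k : Int) (out : Int) : Decidable (Spec_solution numbers k out) := by
  unfold Spec_solution; infer_instance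

-- ===== CLAIM (what is proved, stated in full; the proofs are below) =====
def Claim_equal_solution : Prop := ∀ (numbers : List Int) (k : Int), Dom_solution numbers k → Pre_solution numbers k → Spec_solution numbers k (solution numbers k)

-- ===== LEMMAS AND PROOFS =====

-- one unfolding of A's loop
lemma solAuxA_succ (numbers : List Int) (n : Nat) (a i : Int) :
    solAuxA numbers (n + 1) a i =
      match PySem.List.pyGet? numbers i with
      | none => none
      | some v =>
        solAuxA numbers n v
          (if i + 2 > (numbers.length : Int) - 1 then i + 2 - (numbers.length : Int) else i + 2) :=
  rfl

-- closed form of A's loop when the list has length ≥ 2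
lemma solAuxA_closed (numbers : List Int) (hL : 2 ≤ numbers.length) :
    ∀ (n : Nat) (a : Int) (i : Nat), i < numbers.length →
      solAuxA numbers (n + 1) a (i : Int) =
        some (numbers.getD ((i + 2 * n) % numbers.length) 0) := by
  intro n
  induction n with
  | zero =>
    intro a i hi
    rw [solAuxA_succ, PySem.List.pyGet?_ofNat numbers i hi]
    have h2 : (i + 2 * 0) % numbers.length = i := by
      simpa using Nat.mod_eq_of_lt hi
    rw [h2, List.getD_eq_getElem _ _ hi]
    rfl
  | succ n ih =>
    intro a i hi
    set L := numbers.length with hLdef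
    have hstep : (if ((i : Int) + 2 > (L : Int) - 1) then (i : Int) + 2 - (L : Int) else (i : Int) + 2)
        = (((i + 2) % L : Nat) : Int) := by
      by_cases h : i + 2 < L
      · have hni : ¬ ((i : Int) + 2 > (L : Int) - 1) := by push_cast; omega
        rw [if_neg hni, Nat.mod_eq_of_lt h]
        omega
      · have hge : L ≤ i + 2 := by omega
        have hyi : ((i : Int) + 2 > (L : Int) - 1) := by push_cast; omega
        rw [if_pos hyi, Nat.mod_eq_sub_mod hge, Nat.mod_eq_of_lt (by omega)]
        rw [Nat.cast_sub hge]; omega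
    have hv := PySem.List.pyGet?_ofNat numbers i hi
    rw [solAuxA_succ, hv]
    dsimp only
    rw [hstep, ih numbers[i] ((i + 2) % L) (Nat.mod_lt _ (by omega))]
    have hidx : ((i + 2) % L + 2 * n) % L = (i + 2 * (n + 1)) % L := by
      rw [Nat.mod_add_mod]; congr 1; ring
    rw [hidx]

-- B's index as a Nat modulus, for k ≥ 1 and a nonempty list
lemma alt_closed (numbers : List Int) (k : Int) (hk : 1 ≤ k) (hL : 1 ≤ numbers.length) :
    solution_alt numbers k = numbers.getD ((2 * (k - 1).toNat) % numbers.length) 0 := by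
  have hk0 : ¬ k ≤ 0 := by omega
  have hcast : (2 * (k - 1)) = ((2 * (k - 1).toNat : Nat) : Int) := by
    push_cast; omega
  have hmod : PySem.Int.mod (2 * (k - 1)) (numbers.length : Int)
      = (((2 * (k - 1).toNat) % numbers.length : Nat) : Int) := by
    rw [PySem.Int.mod_eq_emod_of_pos (by exact_mod_cast hL), hcast]
    exact (Int.natCast_mod _ _).symm
  unfold solution_alt
  rw [if_neg hk0, hmod, PySem.List.pyGet?_natCast, List.getD_eq_getElem?_getD]

-- ===== VERDICT (by name: the statement is the Claim_ definition above) =====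
theorem solution_spec : Claim_equal_solution := by
  intro numbers k _ hpre
  unfold Spec_solution
  by_cases hk : k ≤ 0
  · have : k.toNat = 0 := by omega
    simp [solution, solution_alt, this, hk, solAuxA]
  · have hk1 : 1 ≤ k := by omega
    rcases hpre with h | hL | ⟨h1, hke⟩
    · omega
    · -- length ≥ 2
      have hm : k.toNat = (k.toNat - 1) + 1 := by omega
      have := solAuxA_closed numbers hL (k.toNat - 1) 0 0 (by omega)
      simp only [Nat.cast_zero] at this
      rw [solution, hm, this, alt_closed numbers k hk1 (by omega)]
      have hEq : 0 + 2 * (k.toNat - 1) = 2 * (k - 1).toNat := by omega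
      simp only [Option.getD_some, hEq]
    · -- singleton list, k = 1
      rcases numbers with _ | ⟨x, _ | _⟩ <;> simp_all
      subst hke
      simp [solution, solution_alt, solAuxA, PySem.List.pyGet?,
        PySem.List.pyIdx?, PySem.Int.mod]
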